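-- pv_equiv track=rewrite | github.com/sadhanasharma26/focus-mode-controller | app/blocker.py | _build_block_lines
-- ===== SOURCE A (Python) =====
-- def _normalize_domain(domain: str) -> str:
--     cleaned = domain.strip().lower()
--     if cleaned.startswith("www."):
--         cleaned = cleaned[4:]
--     return cleaned
--
-- def _build_block_lines(domains: list[str]) -> list[str]:
--     lines: list[str] = []
--     seen: set[str] = set()
--
--     for domain in domains:
--         normalized = _normalize_domain(domain)
--         if not normalized or normalized in seen:
--             continue
--         seen.add(normalized)
--         lines.append(f"127.0.0.1 {normalized}\n")
--         lines.append(f"127.0.0.1 www.{normalized}\n")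
--
--     return lines
-- ===== SOURCE B (Python) =====
-- def _normalize_domain(domain: str) -> str:
--     cleaned = domain.strip().lower()
--     if cleaned.startswith("www."):
--         cleaned = cleaned[4:]
--     return cleaned
--
-- def _build_block_lines(domains: list[str]) -> list[str]:
--     # Index-table algorithm: a reverse pass records each nonempty name's FIRST
--     # index (later writes overwrite earlier ones), then a forward pass emits the
--     # two lines exactly at positions equal to the recorded first index.
--     # No seen-set is maintained while emitting.
--     norm = [_normalize_domain(d) for d in domains]
--     first = {}
--     for i, n in reversed(list(enumerate(norm))):
--         if n:
--             first[n] = i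
--     lines = []
--     for i, n in enumerate(norm):
--         if n and first.get(n) == i:
--             lines.append(f"127.0.0.1 {n}\n")
--             lines.append(f"127.0.0.1 www.{n}\n")
--     return lines
-- ===== Notes on version B (the rewrite author's own statement) =====
-- stated objective: alternative
-- what changed: Replaces A's single pass with an incrementally maintained seen-set by a two-pass index-table scheme: a reverse pass over enumerate(norm) records each name's first index by overwriting, and a forward pass emits the two lines at exactly the positions whose index equals the recorded first index.
import Mathlib
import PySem

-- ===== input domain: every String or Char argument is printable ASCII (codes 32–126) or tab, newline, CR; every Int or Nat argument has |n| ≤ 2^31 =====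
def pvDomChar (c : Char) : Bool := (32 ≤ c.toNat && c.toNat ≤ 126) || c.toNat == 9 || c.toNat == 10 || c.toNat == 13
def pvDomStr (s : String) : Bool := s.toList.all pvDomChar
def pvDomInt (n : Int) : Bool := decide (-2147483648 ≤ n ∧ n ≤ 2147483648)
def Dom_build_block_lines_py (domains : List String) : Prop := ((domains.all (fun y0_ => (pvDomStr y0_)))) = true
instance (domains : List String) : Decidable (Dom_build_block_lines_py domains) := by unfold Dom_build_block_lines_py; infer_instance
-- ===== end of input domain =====

-- B replaces A's single pass with a seen-set by a two-pass index-table scheme: a reverse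
-- pass records each nonempty name's first index (later writes overwrite), then a forward
-- pass emits the two lines exactly where the index equals that first index; objective: alternative.

-- ===== PORT A =====
-- shared helper: the module's _normalize_domain
def normalize_domain_py (domain : String) : String :=
  let cleaned := PySem.Str.lower (PySem.Str.strip domain)
  if PySem.Str.startswith cleaned "www." then PySem.Str.slice cleaned (some 4) none
  else cleaned

def build_block_lines_py (domains : List String) : List String :=
  (domains.foldl
    (fun (st : List String × PySem.Set String) domain =>
      let normalized := normalize_domain_py domain
      if normalized = "" ∨ normalized ∈ st.2 then st
      else (st.1 ++ ["127.0.0.1 " ++ normalized ++ "\n",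
                     "127.0.0.1 www." ++ normalized ++ "\n"],
            PySem.Set.add st.2 normalized))
    ([], PySem.Set.empty)).1

-- ===== PORT B =====
def build_block_lines_py_alt (domains : List String) : List String :=
  let norm := domains.map normalize_domain_py
  -- reverse pass: first[n] = i, later (= smaller-index) writes overwrite
  let first := ((PySem.List.enumerate norm).reverse).foldl
    (fun (d : PySem.Dict String Int) p => if p.2 = "" then d else d.insert p.2 p.1)
    PySem.Dict.empty
  -- forward pass: emit where the position is the recorded first index
  (PySem.List.enumerate norm).foldl
    (fun lines p =>
      if p.2 ≠ "" ∧ first.get? p.2 = some p.1 then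
        lines ++ ["127.0.0.1 " ++ p.2 ++ "\n", "127.0.0.1 www." ++ p.2 ++ "\n"]
      else lines)
    []

-- ===== PRECONDITION & SPEC =====
def Spec_build_block_lines_py (domains : List String) (out : List String) : Prop := out = build_block_lines_py_alt domains
instance (domains : List String) (out : List String) : Decidable (Spec_build_block_lines_py domains out) := by unfold Spec_build_block_lines_py; infer_instance

-- ===== CLAIM (what is proved, stated in full; the proofs are below) =====
def Claim_equal_build_block_lines_py : Prop := ∀ (domains : List String), Dom_build_block_lines_py domains → Spec_build_block_lines_py domains (build_block_lines_py domains)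

-- ===== LEMMAS AND PROOFS =====

-- the normalized domains A's loop would newly emit, given the already-seen set
def pvNewElems (seen : PySem.Set String) : List String → List String
  | [] => []
  | n :: ms =>
    if n = "" ∨ n ∈ seen then pvNewElems seen ms
    else n :: pvNewElems (PySem.Set.add seen n) ms

def pvStep (st : List String × PySem.Set String) (domain : String) : List String × PySem.Set String :=
  let normalized := normalize_domain_py domain
  if normalized = "" ∨ normalized ∈ st.2 then st
  else (st.1 ++ ["127.0.0.1 " ++ normalized ++ "\n",
                 "127.0.0.1 www." ++ normalized ++ "\n"],
        PySem.Set.add st.2 normalized)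

def pvLines (n : String) : List String :=
  ["127.0.0.1 " ++ n ++ "\n", "127.0.0.1 www." ++ n ++ "\n"]

-- B's dict-building step and the dict built for a given name list
def pvDStep (d : PySem.Dict String Int) (p : Int × String) : PySem.Dict String Int :=
  if p.2 = "" then d else d.insert p.2 p.1

def pvFirst (ms : List String) : PySem.Dict String Int :=
  ((PySem.List.enumerate ms).reverse).foldl pvDStep PySem.Dict.empty

def pvPred (n : String) (p : Int × String) : Bool := p.2 == n && !(p.2 == "")

lemma pvFoldl_fst (ys : List String) : ∀ (lines : List String) (seen : PySem.Set String),
    (ys.foldl pvStep (lines, seen)).1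
      = lines ++ (pvNewElems seen (ys.map normalize_domain_py)).flatMap pvLines := by
  induction ys with
  | nil => intro lines seen; simp [pvNewElems]
  | cons d ys ih =>
    intro lines seen
    simp only [List.map_cons, List.foldl_cons, pvNewElems, pvStep]
    by_cases h : normalize_domain_py d = "" ∨ normalize_domain_py d ∈ seen
    · rw [if_pos h, if_pos h]
      exact ih lines seen
    · rw [if_neg h, if_neg h, ih]
      simp [pvLines]

-- pvNewElems only looks at membership of nonempty names in the seen set
lemma pvNewElems_congr (ms : List String) : ∀ (s t : PySem.Set String),
    (∀ x, x ≠ "" → (x ∈ s ↔ x ∈ t)) → pvNewElems s ms = pvNewElems t ms := by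
  induction ms with
  | nil => intro s t _; rfl
  | cons n ms ih =>
    intro s t h
    rw [pvNewElems, pvNewElems]
    by_cases hn : n = ""
    · rw [if_pos (Or.inl hn), if_pos (Or.inl hn)]
      exact ih s t h
    · by_cases hs : n ∈ s
      · rw [if_pos (Or.inr hs), if_pos (Or.inr ((h n hn).1 hs))]
        exact ih s t h
      · rw [if_neg (by tauto), if_neg (by rw [← h n hn] at *; tauto)]
        congr 1
        apply ih
        intro x hx
        rw [PySem.Set.mem_add, PySem.Set.mem_add, h x hx]

-- get? after the insert loop = value of the LAST matching pair processed
lemma pvFold_get? (ps : List (Int × String)) : ∀ (d : PySem.Dict String Int) (n : String),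
    (ps.foldl pvDStep d).get? n
      = (match ps.reverse.find? (pvPred n) with
         | some p => some p.1
         | none => d.get? n) := by
  induction ps with
  | nil => intro d n; simp
  | cons p ps ih =>
    intro d n
    rw [List.foldl_cons, ih, List.reverse_cons]
    cases hfind : ps.reverse.find? (pvPred n) with
    | some q => simp [List.find?_append, hfind]
    | none =>
      simp only [List.find?_append, hfind, Option.none_or]
      by_cases h2 : p.2 = ""
      · rw [List.find?_cons_of_neg (by simp [pvPred, h2])]
        simp [pvDStep, h2]
      · by_cases hn : p.2 = n
        · have hpred : pvPred n p = true := by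
            simp only [pvPred, hn, BEq.rfl, Bool.true_and, Bool.not_eq_eq_eq_not, Bool.not_true,
              beq_eq_false_iff_ne, ne_eq]
            exact hn ▸ h2
          rw [List.find?_cons_of_pos hpred]
          show (pvDStep d p).get? n = some p.1
          simp only [pvDStep, if_neg h2]
          rw [hn, PySem.Dict.get?_insert_self]
        · rw [List.find?_cons_of_neg (by simp [pvPred, hn])]
          show (pvDStep d p).get? n = d.get? n
          simp only [pvDStep, if_neg h2]
          exact PySem.Dict.get?_insert_of_ne _ _ (show n ≠ p.2 from fun h => hn (Eq.symm h))

-- first occurrence found: the name is not in the prefix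
lemma pvFind_notmem (n : String) (hn : n ≠ "") (rest : List String) :
    ∀ (pre : List String) (k : Int), n ∉ pre →
    (PySem.List.enumerate (pre ++ n :: rest) k).find? (pvPred n)
      = some (k + (pre.length : Int), n) := by
  intro pre
  induction pre with
  | nil =>
    intro k _
    rw [List.nil_append, PySem.List.enumerate_cons, List.find?_cons_of_pos (by simp [pvPred, hn])]
    simp
  | cons q pre ih =>
    intro k hmem
    have hq : q ≠ n := by intro h; exact hmem (by simp [h])
    rw [List.cons_append, PySem.List.enumerate_cons,
        List.find?_cons_of_neg (by simp [pvPred, hq]), ih (k + 1) (by simp at hmem; tauto)]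
    congr 1
    simp
    ring

-- the name occurs in the prefix: find? returns some strictly smaller index
lemma pvFind_mem (n : String) (hn : n ≠ "") (rest : List String) :
    ∀ (pre : List String) (k : Int), n ∈ pre →
    ∃ j : Nat, j < pre.length ∧
      (PySem.List.enumerate (pre ++ rest) k).find? (pvPred n) = some (k + (j : Int), n) := by
  intro pre
  induction pre with
  | nil => intro k h; exact absurd h (by simp)
  | cons q pre ih =>
    intro k hmem
    by_cases hq : q = n
    · refine ⟨0, by simp, ?_⟩
      rw [List.cons_append, PySem.List.enumerate_cons,
          List.find?_cons_of_pos (by simp [pvPred, hq, hn])]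
      simp [hq]
    · have hmem' : n ∈ pre := by simp at hmem; tauto
      obtain ⟨j, hj, hfind⟩ := ih (k + 1) hmem'
      refine ⟨j + 1, by simp [hj], ?_⟩
      rw [List.cons_append, PySem.List.enumerate_cons,
          List.find?_cons_of_neg (by simp [pvPred, hq]), hfind]
      congr 2
      push_cast
      ring

-- the emit pass, started after an already-processed prefix, emits A's new lines
lemma pvEmit (suf : List String) : ∀ (pre : List String) (acc : List String),
    (PySem.List.enumerate suf (pre.length : Int)).foldl
      (fun lines p =>
        if p.2 ≠ "" ∧ (pvFirst (pre ++ suf)).get? p.2 = some p.1 then lines ++ pvLines p.2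
        else lines)
      acc
    = acc ++ (pvNewElems (PySem.Set.ofList pre) suf).flatMap pvLines := by
  induction suf with
  | nil => intro pre acc; simp [pvNewElems]
  | cons n suf ih =>
    intro pre acc
    have hget : (pvFirst (pre ++ n :: suf)).get? n
        = ((PySem.List.enumerate (pre ++ n :: suf) 0).find? (pvPred n)).map (·.1) := by
      unfold pvFirst
      rw [pvFold_get?, List.reverse_reverse]
      cases hf : (PySem.List.enumerate (pre ++ n :: suf) 0).find? (pvPred n) <;>
        simp [PySem.Dict.get?_empty]
    have hre : pre ++ [n] ++ suf = pre ++ n :: suf := by simp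
    rw [PySem.List.enumerate_cons, List.foldl_cons, pvNewElems]
    by_cases hn : n = ""
    · rw [if_neg (by simp [hn]), if_pos (Or.inl hn)]
      have := ih (pre ++ [n]) acc
      rw [hre] at this
      rw [show ((pre ++ [n]).length : Int) = (pre.length : Int) + 1 by simp] at this
      rw [this, pvNewElems_congr suf (PySem.Set.ofList (pre ++ [n])) (PySem.Set.ofList pre)
            (by intro x hx; rw [PySem.Set.mem_ofList, PySem.Set.mem_ofList]; simp [hn]; tauto)]
    · by_cases hpre : n ∈ pre
      · -- first index lies in the prefix, so the test at this position fails
        obtain ⟨j, hj, hfind⟩ := pvFind_mem n hn (n :: suf) pre 0 hpre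
        have hne : (pvFirst (pre ++ n :: suf)).get? n ≠ some (pre.length : Int) := by
          rw [hget, hfind]
          simp
          omega
        rw [if_neg (by tauto), if_pos (Or.inr (by rw [PySem.Set.mem_ofList]; exact hpre))]
        have := ih (pre ++ [n]) acc
        rw [hre] at this
        rw [show ((pre ++ [n]).length : Int) = (pre.length : Int) + 1 by simp] at this
        rw [this, pvNewElems_congr suf (PySem.Set.ofList (pre ++ [n])) (PySem.Set.ofList pre)
              (by intro x hx; rw [PySem.Set.mem_ofList, PySem.Set.mem_ofList]; simp
                  intro h; rw [h]; exact hpre)]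
      · -- this is the first occurrence: the test succeeds and the lines are emitted
        have heq : (pvFirst (pre ++ n :: suf)).get? n = some (pre.length : Int) := by
          rw [hget, pvFind_notmem n hn suf pre 0 hpre]
          simp
        rw [if_pos ⟨hn, heq⟩, if_neg (by rw [PySem.Set.mem_ofList]; tauto)]
        have := ih (pre ++ [n]) (acc ++ pvLines n)
        rw [hre] at this
        rw [show ((pre ++ [n]).length : Int) = (pre.length : Int) + 1 by simp] at this
        rw [this, pvNewElems_congr suf (PySem.Set.ofList (pre ++ [n]))
              (PySem.Set.add (PySem.Set.ofList pre) n)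
              (by intro x hx
                  rw [PySem.Set.mem_ofList, PySem.Set.mem_add, PySem.Set.mem_ofList]
                  simp)]
        simp [pvLines]

-- ===== VERDICT (by name: the statement is the Claim_ definition above) =====
theorem build_block_lines_py_spec : Claim_equal_build_block_lines_py := by
  intro domains _
  unfold Spec_build_block_lines_py build_block_lines_py build_block_lines_py_alt
  have hstep : (fun (st : List String × PySem.Set String) domain =>
      let normalized := normalize_domain_py domain
      if normalized = "" ∨ normalized ∈ st.2 then st
      else (st.1 ++ ["127.0.0.1 " ++ normalized ++ "\n",
                     "127.0.0.1 www." ++ normalized ++ "\n"],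
            PySem.Set.add st.2 normalized)) = pvStep := rfl
  rw [hstep, pvFoldl_fst domains [] PySem.Set.empty]
  have := pvEmit (domains.map normalize_domain_py) [] []
  simp only [List.nil_append, List.length_nil, Nat.cast_zero] at this
  rw [show (PySem.Set.ofList ([] : List String)) = PySem.Set.empty from rfl] at this
  simp only [List.nil_append] at this ⊢
  exact this.symm
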